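-- pv_equiv track=rewrite | github.com/nicokla/Naturalingua_dictionaries | dictionaries/meanings.py | getRidOfPronounciation
-- ===== SOURCE A (Python) =====
-- def getRidOfPronounciation(txt):
-- 	condition=True
-- 	s = ''
-- 	i=0
-- 	while i <len(txt):
-- 		c=txt[i]
-- 		if c == '/':
-- 			condition = not condition
-- 		if condition and c!='/':
-- 			if(i==0 or not(txt[i]==' ' and txt[i-1]=='/')):
-- 				s += c
-- 		i+=1
-- 	return s
-- ===== SOURCE B (Python) =====
-- def getRidOfPronounciation(txt):
--     parts = txt.split('/')
--     s = parts[0]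
--     rest = parts[1:]
--     while len(rest) >= 2:
--         p = rest[1]
--         if p.startswith(' '):
--             p = p[1:]
--         s += p
--         rest = rest[2:]
--     return s
-- ===== Notes on version B (the rewrite author's own statement) =====
-- stated objective: simpler
-- what changed: Replaces the char-by-char toggle-flag state machine (condition bit, previous-char check) with split('/') followed by a pairwise walk that keeps segment 0 and every later even-indexed segment with one leading space stripped.
import Mathlib
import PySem

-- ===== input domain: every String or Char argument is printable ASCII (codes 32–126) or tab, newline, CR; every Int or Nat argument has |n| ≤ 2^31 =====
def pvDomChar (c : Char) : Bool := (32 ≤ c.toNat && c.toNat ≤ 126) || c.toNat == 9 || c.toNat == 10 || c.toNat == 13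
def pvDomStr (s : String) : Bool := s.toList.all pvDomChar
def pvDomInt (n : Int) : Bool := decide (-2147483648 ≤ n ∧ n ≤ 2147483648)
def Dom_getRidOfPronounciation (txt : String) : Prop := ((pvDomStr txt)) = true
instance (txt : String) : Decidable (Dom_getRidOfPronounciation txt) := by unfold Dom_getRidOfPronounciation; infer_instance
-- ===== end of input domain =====

-- B replaces A's char-by-char toggle-flag state machine with split('/') plus a pairwise walk
-- over the segments (objective: simpler). Both are total; return values only, no mutation.

-- ===== PORT A =====
-- A's while loop over txt with state (condition, s, prev); 'prev = none' encodes i == 0,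
-- otherwise prev = some txt[i-1].
def pvStepA (st : Bool × List Char × Option Char) (c : Char) : Bool × List Char × Option Char :=
  let cond := if c = '/' then !st.1 else st.1
  let s := if cond ∧ c ≠ '/' then
             (if st.2.2 = none ∨ ¬(c = ' ' ∧ st.2.2 = some '/') then st.2.1 ++ [c] else st.2.1)
           else st.2.1
  (cond, s, some c)

def getRidOfPronounciation (txt : String) : String :=
  String.mk (txt.toList.foldl pvStepA (true, [], none)).2.1

-- ===== PORT B =====
-- while len(rest) >= 2: p = rest[1]; strip one leading space; s += p; rest = rest[2:]
def pvBLoop : List (List Char) → List Char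
  | _ :: p :: rest =>
      (if PySem.Chars.startswith p [' '] then PySem.List.slice p (some 1) none else p) ++ pvBLoop rest
  | _ => []

def getRidOfPronounciation_alt (txt : String) : String :=
  let parts := PySem.Chars.splitOn txt.toList ['/']
  -- parts[0]: split never returns an empty list, so Python's parts[0] is the head
  String.mk (parts.headD [] ++ pvBLoop (PySem.List.slice parts (some 1) none))

-- ===== PRECONDITION & SPEC =====
def Spec_getRidOfPronounciation (txt : String) (out : String) : Prop := out = getRidOfPronounciation_alt txt
instance (txt : String) (out : String) : Decidable (Spec_getRidOfPronounciation txt out) := by unfold Spec_getRidOfPronounciation; infer_instance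

-- ===== CLAIM (what is proved, stated in full; the proofs are below) =====
def Claim_equal_getRidOfPronounciation : Prop := ∀ (txt : String), Dom_getRidOfPronounciation txt → Spec_getRidOfPronounciation txt (getRidOfPronounciation txt)

-- ===== LEMMAS AND PROOFS =====

-- Reference segmentation: splitOn with separator '/' computed structurally.
def pvSegs : List Char → List (List Char)
  | [] => [[]]
  | c :: l => if c = '/' then [] :: pvSegs l else (pvSegs l).modifyHead (c :: ·)

theorem pvSegs_ne_nil (l : List Char) : pvSegs l ≠ [] := by
  induction l with
  | nil => simp [pvSegs]
  | cons c l ih =>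
    simp only [pvSegs]
    split
    · simp
    · cases h : pvSegs l with
      | nil => exact absurd h ih
      | cons s ss => simp [List.modifyHead]

theorem pvSplitOn_go_eq (l : List Char) : ∀ (fuel : ℕ) (cur : List Char) (acc : List (List Char)),
    l.length < fuel →
    PySem.Chars.splitOn.go ['/'] fuel l cur acc
      = acc.reverse ++ (pvSegs l).modifyHead (cur.reverse ++ ·) := by
  induction l with
  | nil =>
    intro fuel cur acc h
    match fuel, h with
    | fuel + 1, _ =>
      rw [PySem.Chars.splitOn.go.eq_def]
      simp [pvSegs]
  | cons c rest ih =>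
    intro fuel cur acc h
    match fuel, h with
    | fuel + 1, h =>
      rw [PySem.Chars.splitOn.go.eq_def]
      simp only []
      by_cases hc : c = '/'
      · subst hc
        have hp : List.isPrefixOf ['/'] ('/' :: rest) = true := by simp [List.isPrefixOf]
        rw [if_pos hp]
        have := ih fuel [] (cur.reverse :: acc) (by simpa using h)
        simp [this, pvSegs]
        cases hs : pvSegs rest with
        | nil => exact absurd hs (pvSegs_ne_nil rest)
        | cons s ss => simp [List.modifyHead]
      · have hp : List.isPrefixOf ['/'] (c :: rest) = false := by
          simp [List.isPrefixOf]; exact fun h' => absurd h'.symm hc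
        rw [if_neg (by simp [hp])]
        have := ih fuel (c :: cur) acc (by simpa using h)
        rw [this]
        simp [pvSegs, hc, List.modifyHead_modifyHead]
        cases hs : pvSegs rest with
        | nil => exact absurd hs (pvSegs_ne_nil rest)
        | cons s ss => simp [List.modifyHead]

theorem pvSplitOn_eq (l : List Char) : PySem.Chars.splitOn l ['/'] = pvSegs l := by
  unfold PySem.Chars.splitOn
  rw [pvSplitOn_go_eq l (l.length + 1) [] [] (by omega)]
  cases hs : pvSegs l with
  | nil => exact absurd hs (pvSegs_ne_nil l)
  | cons s ss => simp [List.modifyHead]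

-- A's scan as a structural recursion: state (condition, "previous char was '/'").
def pvKeep : Bool → Bool → List Char → List Char
  | _, _, [] => []
  | cond, ss, c :: l =>
    let cond' := if c = '/' then !cond else cond
    (if cond' = true ∧ c ≠ '/' ∧ ¬(ss = true ∧ c = ' ') then [c] else []) ++ pvKeep cond' (decide (c = '/')) l

theorem pvFoldl_stepA (l : List Char) : ∀ (cond : Bool) (s : List Char) (prev : Option Char),
    (l.foldl pvStepA (cond, s, prev)).2.1
      = s ++ pvKeep cond (decide (prev = some '/')) l := by
  induction l with
  | nil => intro cond s prev; simp [pvKeep]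
  | cons c l ih =>
    intro cond s prev
    simp only [List.foldl_cons, pvKeep]
    rw [pvStepA, ih]
    by_cases hc : c = '/' <;> by_cases hcond : (if c = '/' then !cond else cond) = true <;>
      by_cases hss : (prev = some '/') <;>
      by_cases hsp : c = ' ' <;>
      simp_all

def pvStrip1 (b : Bool) (p : List Char) : List Char :=
  if b then (if PySem.Chars.startswith p [' '] then PySem.List.slice p (some 1) none else p) else p

theorem pvKeep_segs (l : List Char) : ∀ (b : Bool),
    (pvKeep true b l = pvStrip1 b ((pvSegs l).headD []) ++ pvBLoop ((pvSegs l).drop 1))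
    ∧ (pvKeep false b l = pvBLoop (pvSegs l)) := by
  induction l with
  | nil => intro b; simp [pvKeep, pvSegs, pvBLoop, pvStrip1, PySem.Chars.startswith]
  | cons c l ih =>
    intro b
    by_cases hc : c = '/'
    · subst hc
      constructor
      · -- keep true b ('/'::l) = keep false false l = bLoop (segs l)
        simp only [pvKeep, pvSegs]
        simp [(ih true).2, pvStrip1, PySem.Chars.startswith]
      · -- keep false b ('/'::l) = keep true true l
        simp only [pvKeep, pvSegs]
        rcases hs : pvSegs l with _ | ⟨s, ss⟩
        · exact absurd hs (pvSegs_ne_nil l)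
        · have := (ih true).1
          rw [hs] at this
          simp only [List.headD, List.drop] at this
          simp [this, pvBLoop, pvStrip1]
    · rcases hs : pvSegs l with _ | ⟨s, ss⟩
      · exact absurd hs (pvSegs_ne_nil l)
      constructor
      · -- keep true b (c::l) = guard ++ keep true false l
        have h2 := (ih false).1
        rw [hs] at h2
        simp only [List.headD_cons, List.drop_one, List.tail_cons] at h2
        by_cases hsp : c = ' '
        · subst hsp
          by_cases hb : b = true <;>
            simp_all [pvKeep, pvSegs, pvStrip1, PySem.Chars.startswith,
              List.isPrefixOf, PySem.List.slice_from]
        · have hsp' : ¬(' ' = c) := fun h => hsp h.symm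
          by_cases hb : b = true <;>
            simp_all [pvKeep, pvSegs, pvStrip1, PySem.Chars.startswith,
              List.isPrefixOf, PySem.List.slice_from]
      · -- keep false b (c::l) = keep false false l ; bLoop ignores the head
        have h3 := (ih false).2
        rw [hs] at h3
        simp [pvKeep, pvSegs, hc, hs, h3]
        cases ss <;> simp [pvBLoop]

-- ===== VERDICT (by name: the statement is the Claim_ definition above) =====
theorem getRidOfPronounciation_spec : Claim_equal_getRidOfPronounciation := by
  intro txt _
  unfold Spec_getRidOfPronounciation getRidOfPronounciation getRidOfPronounciation_alt
  rw [pvFoldl_stepA, pvSplitOn_eq]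
  simp only [List.nil_append]
  have h1 := (pvKeep_segs txt.toList (decide ((none : Option Char) = some '/'))).1
  rw [h1]
  rcases hs : pvSegs txt.toList with _ | ⟨s, ss⟩
  · exact absurd hs (pvSegs_ne_nil txt.toList)
  · simp [pvStrip1, PySem.List.slice_from (a := (1 : ℤ))]
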